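-- pv_equiv track=rewrite | github.com/zsc/Tanks | js-tanks-3d/audio/abc_to_ogg.py | parse_chord
-- ===== SOURCE A (Python) =====
-- def parse_chord(chord_str):
--     """Parse ABC chord notation like [CEG] into individual notes."""
--     # Remove brackets
--     chord_str = chord_str.strip('[]')
--     notes = []
--     i = 0
--     while i < len(chord_str):
--         # Handle notes with modifiers (,')
--         if i < len(chord_str) - 1 and chord_str[i+1] in ',\'':
--             notes.append(chord_str[i:i+2])
--             i += 2
--         else:
--             notes.append(chord_str[i])
--             i += 1
--     return notes
-- ===== SOURCE B (Python) =====
-- import re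
--
-- def parse_chord(chord_str):
--     """Parse ABC chord notation like [CEG] into individual notes."""
--     # Regex tokenizer: one base character, optionally followed by one modifier.
--     return re.findall(r"[\s\S][,']?", chord_str.strip('[]'))
-- ===== Notes on version B (the rewrite author's own statement) =====
-- stated objective: idiomatic
-- what changed: Replaces the manual index-stepping while loop with a single re.findall regex tokenizer (one base character plus an optional comma/apostrophe modifier) over the stripped string.
import Mathlib
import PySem

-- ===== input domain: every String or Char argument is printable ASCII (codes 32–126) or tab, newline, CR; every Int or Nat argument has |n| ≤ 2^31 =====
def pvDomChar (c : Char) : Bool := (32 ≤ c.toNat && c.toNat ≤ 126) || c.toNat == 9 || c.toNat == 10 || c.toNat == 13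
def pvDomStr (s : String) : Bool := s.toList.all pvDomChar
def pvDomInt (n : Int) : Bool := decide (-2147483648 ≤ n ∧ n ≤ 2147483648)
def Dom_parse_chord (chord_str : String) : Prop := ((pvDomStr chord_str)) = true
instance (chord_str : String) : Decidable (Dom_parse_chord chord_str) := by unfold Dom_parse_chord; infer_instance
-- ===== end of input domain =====

-- B replaces A's index-stepping while loop by a regex tokenizer (re.findall r"[\s\S][,']?"), ported
-- as a structural pattern-match tokenizer; objective: idiomatic, same result on every input.

-- ===== PORT A =====
-- while loop over index i, ported as recursion on s.length - i; s[i:i+2] → PySem.List.slice,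
-- s[i]/s[i+1] → PySem.List.pyGet? (in-range here, so the Option is eliminated with "" never used)
def parse_chord_go (s : List Char) (i : Nat) (notes : List String) : List String :=
  if i < s.length then
    if i < s.length - 1 ∧
        (PySem.List.pyGet? s ((i + 1 : Nat) : Int)).any (fun c => decide (c = ',' ∨ c = '\'')) then
      parse_chord_go s (i + 2)
        (notes ++ [String.ofList (PySem.List.slice s (some (i : Int)) (some ((i + 2 : Nat) : Int)))])
    else
      parse_chord_go s (i + 1)
        (notes ++ [(PySem.List.pyGet? s (i : Int)).elim "" (fun c => String.ofList [c])])
  else notes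
termination_by s.length - i

def parse_chord (chord_str : String) : List String :=
  parse_chord_go (PySem.Str.stripChars chord_str "[]").toList 0 []

-- ===== PORT B =====
-- re.findall(r"[\s\S][,']?", s): each match is any one character plus at most one modifier
def chordTok : List Char → List String
  | [] => []
  | [c] => [String.ofList [c]]
  | c :: m :: rest =>
      if m = ',' ∨ m = '\'' then String.ofList [c, m] :: chordTok rest
      else String.ofList [c] :: chordTok (m :: rest)

def parse_chord_alt (chord_str : String) : List String :=
  chordTok (PySem.Str.stripChars chord_str "[]").toList

-- ===== PRECONDITION & SPEC =====
def Spec_parse_chord (chord_str : String) (out : List String) : Prop := out = parse_chord_alt chord_str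
instance (chord_str : String) (out : List String) : Decidable (Spec_parse_chord chord_str out) := by unfold Spec_parse_chord; infer_instance

-- ===== CLAIM (what is proved, stated in full; the proofs are below) =====
def Claim_equal_parse_chord : Prop := ∀ (chord_str : String), Dom_parse_chord chord_str → Spec_parse_chord chord_str (parse_chord chord_str)

-- ===== LEMMAS AND PROOFS =====
lemma goA_eq (s : List Char) :
    ∀ (n i : Nat) (notes : List String), s.length - i ≤ n →
      parse_chord_go s i notes = notes ++ chordTok (s.drop i) := by
  intro n
  induction n with
  | zero =>
      intro i notes h
      rw [parse_chord_go]
      have hi : ¬ i < s.length := by omega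
      rw [List.drop_eq_nil_of_le (show s.length ≤ i by omega)]
      simp [hi, chordTok]
  | succ n ih =>
      intro i notes h
      rw [parse_chord_go]
      by_cases hi : i < s.length
      · have hdrop : s.drop i = s[i] :: s.drop (i + 1) := List.drop_eq_getElem_cons hi
        simp only [hi, if_true]
        by_cases hi1 : i + 1 < s.length
        · have hdrop1 : s.drop (i + 1) = s[i + 1] :: s.drop (i + 2) :=
            List.drop_eq_getElem_cons hi1
          have hget1 : PySem.List.pyGet? s ((i + 1 : Nat) : Int) = some s[i + 1] := by
            rw [PySem.List.pyGet?_natCast]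
            exact List.getElem?_eq_getElem hi1
          by_cases hm : s[i + 1] = ',' ∨ s[i + 1] = '\''
          · have hcond : i < s.length - 1 ∧
                (PySem.List.pyGet? s ((i + 1 : Nat) : Int)).any
                  (fun c => decide (c = ',' ∨ c = '\'')) := by
              refine ⟨by omega, ?_⟩
              rw [hget1]
              simp [hm]
            rw [if_pos hcond, ih (i + 2) _ (by omega)]
            have hslice : PySem.List.slice s (some (i : Int)) (some ((i + 2 : Nat) : Int))
                = [s[i], s[i + 1]] := by
              rw [PySem.List.slice_natCast]
              have : i + 2 - i = 2 := by omega
              rw [this, hdrop, hdrop1]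
              rfl
            rw [hslice, hdrop, hdrop1]
            simp [chordTok, hm]
          · have hcond : ¬ (i < s.length - 1 ∧
                (PySem.List.pyGet? s ((i + 1 : Nat) : Int)).any
                  (fun c => decide (c = ',' ∨ c = '\''))) := by
              rintro ⟨-, hb⟩
              rw [hget1] at hb
              simp only [Option.any_some, decide_eq_true_eq] at hb
              exact hm hb
            rw [if_neg hcond, ih (i + 1) _ (by omega)]
            have hget : PySem.List.pyGet? s ((i : Nat) : Int) = some s[i] := by
              rw [PySem.List.pyGet?_natCast]
              exact List.getElem?_eq_getElem hi
            rw [hget, hdrop, hdrop1]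
            simp [chordTok, hm]
        · -- last character
          have hcond : ¬ (i < s.length - 1 ∧
              (PySem.List.pyGet? s ((i + 1 : Nat) : Int)).any
                (fun c => decide (c = ',' ∨ c = '\''))) := by
            rintro ⟨h1, -⟩; omega
          rw [if_neg hcond, ih (i + 1) _ (by omega)]
          have hget : PySem.List.pyGet? s ((i : Nat) : Int) = some s[i] := by
            rw [PySem.List.pyGet?_natCast]
            exact List.getElem?_eq_getElem hi
          have hdrop1 : s.drop (i + 1) = [] := List.drop_eq_nil_of_le (by omega)
          rw [hget, hdrop, hdrop1]
          simp [chordTok]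
      · have hdrop : s.drop i = [] := List.drop_eq_nil_of_le (by omega)
        simp [hi, hdrop, chordTok]

-- ===== VERDICT (by name: the statement is the Claim_ definition above) =====
theorem parse_chord_spec : Claim_equal_parse_chord := by
  intro chord_str _
  unfold Spec_parse_chord parse_chord parse_chord_alt
  simpa using goA_eq (PySem.Str.stripChars chord_str "[]").toList
    (PySem.Str.stripChars chord_str "[]").toList.length 0 [] (by omega)
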